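-- pv_equiv track=rewrite | github.com/vidit1999/coding_problems | devdc238.py | lonelyNum
-- ===== SOURCE A (Python) =====
-- def lonelyNum(number : int) -> int:
--     digits = list(map(int, str(number)))
--     loneliest = digits[0]
--     min_loneliness = min_friends = float('inf')
--
--     for i in range(len(digits)):
--         left_friends = digits[max(0,i-digits[i]):i]
--         right_friends = digits[i+1:min(len(digits),i+1+digits[i])]
--
--         loneliness = sum(left_friends+right_friends)
--         friend_count = len(left_friends+right_friends)
--
--         if(loneliness < min_loneliness):
--             loneliest = digits[i]
--             min_loneliness = loneliness
--             min_friends = friend_count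
--         elif(loneliness == min_loneliness and friend_count < min_friends):
--             loneliest = digits[i]
--             min_friends = friend_count
--
--     return loneliest
-- ===== SOURCE B (Python) =====
-- def lonelyNum(number: int) -> int:
--     digits = list(map(int, str(number)))
--     n = len(digits)
--     # prefix sums: pre[j] = sum of the first j digits
--     pre = [0]
--     s = 0
--     for d in digits:
--         s += d
--         pre.append(s)
--     loneliest = digits[0]
--     best = None  # (min_loneliness, min_friends) so far
--     for i in range(n):
--         lo = max(0, i - digits[i])
--         hi = min(n, i + 1 + digits[i])
--         loneliness = (pre[i] - pre[lo]) + (pre[hi] - pre[i + 1])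
--         friend_count = hi - lo - 1
--         if best is None or loneliness < best[0]:
--             loneliest = digits[i]
--             best = (loneliness, friend_count)
--         elif loneliness == best[0] and friend_count < best[1]:
--             loneliest = digits[i]
--             best = (loneliness, friend_count)
--     return loneliest
-- ===== Notes on version B (the rewrite author's own statement) =====
-- stated objective: alternative
-- what changed: Replaces the per-index left/right list slicing and summing with a prefix-sum array built once, so each window's loneliness and friend count come from O(1) arithmetic instead of materialising and summing slices.
import Mathlib
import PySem

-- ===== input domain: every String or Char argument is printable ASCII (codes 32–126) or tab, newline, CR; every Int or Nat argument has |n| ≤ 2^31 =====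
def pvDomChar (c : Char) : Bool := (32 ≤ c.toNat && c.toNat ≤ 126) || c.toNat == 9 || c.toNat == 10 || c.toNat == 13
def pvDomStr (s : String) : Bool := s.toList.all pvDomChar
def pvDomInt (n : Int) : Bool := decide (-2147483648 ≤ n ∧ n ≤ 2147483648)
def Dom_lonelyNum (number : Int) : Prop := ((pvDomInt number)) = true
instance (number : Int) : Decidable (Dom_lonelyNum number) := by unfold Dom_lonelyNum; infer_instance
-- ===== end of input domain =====

-- B replaces per-index slicing/summing by a prefix-sum table; equal return value on all
-- non-negative inputs (both raise ValueError on negative numbers, via int('-')).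

-- ===== PORT A =====
-- digits = list(map(int, str(number))); int(c) = PySem.Int.ofChars? [c] (never none under Pre_)
def pvDigits (number : Int) : List Int :=
  (PySem.Int.toChars number).map (fun c => (PySem.Int.ofChars? [c]).getD 0)

-- x < m where m starts as float('inf'): none models inf
def pvLtInf (x : Int) (m : Option Int) : Bool :=
  match m with | none => true | some v => decide (x < v)

def pvEqInf (x : Int) (m : Option Int) : Bool :=
  match m with | none => false | some v => decide (x = v)

-- per-index values of A's loop body: (digits[i], loneliness, friend_count)
def pvValsA (digits : List Int) (n : Int) (i : Int) : Int × Int × Int :=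
  let d := PySem.List.pyGetD digits i 0
  let left := PySem.List.slice digits (some (max 0 (i - d))) (some i)
  let right := PySem.List.slice digits (some (i + 1)) (some (min n (i + 1 + d)))
  (d, (left ++ right).sum, ((left ++ right).length : Int))

def pvStepA (digits : List Int) (n : Int)
    (st : Int × Option Int × Option Int) (i : Int) : Int × Option Int × Option Int :=
  let v := pvValsA digits n i
  if pvLtInf v.2.1 st.2.1 then (v.1, some v.2.1, some v.2.2)
  else if pvEqInf v.2.1 st.2.1 && pvLtInf v.2.2 st.2.2 then (v.1, st.2.1, some v.2.2)
  else st

def lonelyNum (number : Int) : Int :=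
  let digits := pvDigits number
  let n : Int := digits.length
  ((PySem.List.pyRange 0 n 1).foldl (pvStepA digits n)
    (PySem.List.pyGetD digits 0 0, none, none)).1

-- ===== PORT B =====
-- pre = [0]; s = 0; for d in digits: s += d; pre.append(s)
def pvPre (digits : List Int) : List Int :=
  (digits.foldl (fun (p : List Int × Int) d => (p.1 ++ [p.2 + d], p.2 + d)) ([0], 0)).1

-- per-index values of B's loop body: (digits[i], loneliness, friend_count)
def pvValsB (digits pre : List Int) (n : Int) (i : Int) : Int × Int × Int :=
  let d := PySem.List.pyGetD digits i 0
  let lo := max 0 (i - d)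
  let hi := min n (i + 1 + d)
  (d, (PySem.List.pyGetD pre i 0 - PySem.List.pyGetD pre lo 0)
        + (PySem.List.pyGetD pre hi 0 - PySem.List.pyGetD pre (i + 1) 0),
      hi - lo - 1)

def pvStepB (digits pre : List Int) (n : Int)
    (st : Int × Option (Int × Int)) (i : Int) : Int × Option (Int × Int) :=
  let v := pvValsB digits pre n i
  match st.2 with
  | none => (v.1, some (v.2.1, v.2.2))
  | some (bl, bf) =>
    if v.2.1 < bl then (v.1, some (v.2.1, v.2.2))
    else if v.2.1 = bl ∧ v.2.2 < bf then (v.1, some (v.2.1, v.2.2))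
    else st

def lonelyNum_alt (number : Int) : Int :=
  let digits := pvDigits number
  let n : Int := digits.length
  let pre := pvPre digits
  ((PySem.List.pyRange 0 n 1).foldl (pvStepB digits pre n)
    (PySem.List.pyGetD digits 0 0, none)).1

-- ===== PRECONDITION & SPEC =====
-- Pre_ excludes negative numbers: str(number) then starts with '-' and int('-') raises ValueError in both programs.
def Pre_lonelyNum (number : Int) : Prop := 0 ≤ number
instance (number : Int) : Decidable (Pre_lonelyNum number) := by unfold Pre_lonelyNum; infer_instance
def pvWitness_lonelyNum : Int := (3021)

def Spec_lonelyNum (number : Int) (out : Int) : Prop := out = lonelyNum_alt number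
instance (number : Int) (out : Int) : Decidable (Spec_lonelyNum number out) := by unfold Spec_lonelyNum; infer_instance

-- ===== CLAIM (what is proved, stated in full; the proofs are below) =====
def Claim_equal_lonelyNum : Prop := ∀ (number : Int), Dom_lonelyNum number → Pre_lonelyNum number → Spec_lonelyNum number (lonelyNum number)

-- ===== LEMMAS AND PROOFS =====

-- every char produced by Nat.toDigits is a decimal digit char (or came from the accumulator)
lemma mem_toDigitsCore (b : Nat) :
    ∀ (f n : Nat) (l : List Char) (c : Char), c ∈ Nat.toDigitsCore b f n l →
      c ∈ l ∨ ∃ k, c = Nat.digitChar k := by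
  intro f
  induction f with
  | zero => intro n l c h; exact Or.inl h
  | succ f ih =>
    intro n l c h
    simp only [Nat.toDigitsCore] at h
    split at h
    · rw [List.mem_cons] at h
      rcases h with h | h
      · exact Or.inr ⟨n % b, h⟩
      · exact Or.inl h
    · rcases ih (n / b) (Nat.digitChar (n % b) :: l) c h with h' | h'
      · rw [List.mem_cons] at h'
        rcases h' with h' | h'
        · exact Or.inr ⟨n % b, h'⟩
        · exact Or.inl h'
      · exact Or.inr h'

-- int(c) of any digit-or-other single char is non-negative after getD 0
lemma ofChars_digitChar_nonneg (k : Nat) :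
    0 ≤ (PySem.Int.ofChars? [Nat.digitChar k]).getD 0 := by
  by_cases hk : k < 16
  · interval_cases k <;> decide
  · have : Nat.digitChar k = '*' := by
      simp only [Nat.digitChar]
      repeat' rw [if_neg (by omega)]
    rw [this]; decide

lemma pvDigits_nonneg (number : Int) (h : 0 ≤ number) :
    ∀ d ∈ pvDigits number, 0 ≤ d := by
  intro d hd
  simp only [pvDigits, List.mem_map] at hd
  obtain ⟨c, hc, rfl⟩ := hd
  simp only [PySem.Int.toChars, if_neg (by omega : ¬ number < 0)] at hc
  rcases mem_toDigitsCore 10 _ _ _ _ hc with h' | ⟨k, rfl⟩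
  · simp at h'
  · exact ofChars_digitChar_nonneg k

-- pvPre digits = [sum of first j digits | j = 0 .. n]
lemma pvPre_fold (ds : List Int) : ∀ (acc : List Int) (s : Int),
    (ds.foldl (fun (p : List Int × Int) d => (p.1 ++ [p.2 + d], p.2 + d)) (acc, s)).1
      = acc ++ (List.range ds.length).map (fun j => s + (ds.take (j + 1)).sum) := by
  induction ds with
  | nil => intro acc s; simp
  | cons d ds ih =>
    intro acc s
    simp only [List.foldl_cons, List.length_cons, List.range_succ_eq_map, List.map_cons,
      List.map_map]
    rw [ih]
    simp only [List.take_succ_cons, List.sum_cons, List.append_assoc, List.singleton_append]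
    congr 2
    · simp
    · apply List.map_congr_left
      intro j _
      simp only [Function.comp_apply, Nat.succ_eq_add_one]
      omega

lemma pvPre_eq (ds : List Int) :
    pvPre ds = (List.range (ds.length + 1)).map (fun j => (ds.take j).sum) := by
  unfold pvPre
  rw [pvPre_fold]
  rw [List.range_succ_eq_map]
  simp [List.map_map, Function.comp]

lemma pvPre_get (ds : List Int) (j : Int) (h0 : 0 ≤ j) (h1 : j ≤ (ds.length : Int)) :
    PySem.List.pyGetD (pvPre ds) j 0 = (ds.take j.toNat).sum := by
  rw [pvPre_eq]
  rw [PySem.List.pyGetD_eq_getElem _ 0 h0 (by simp; omega)]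
  simp only [List.getElem_map, List.getElem_range]

-- sum and length of a clamped slice, via prefix sums
lemma slice_sum_take (ds : List Int) (a b : Int) (h0 : 0 ≤ a) (hab : a ≤ b)
    (hb : b ≤ (ds.length : Int)) :
    (PySem.List.slice ds (some a) (some b)).sum
      = (ds.take b.toNat).sum - (ds.take a.toNat).sum := by
  rw [PySem.List.slice_of_nonneg ds h0 (by omega) (by omega) hb]
  have h3 : a.toNat + (b.toNat - a.toNat) = b.toNat := by omega
  have ht := List.take_add (l := ds) (i := a.toNat) (j := b.toNat - a.toNat)
  rw [h3] at ht
  rw [ht, List.sum_append]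
  ring

lemma slice_len (ds : List Int) (a b : Int) (h0 : 0 ≤ a) (hab : a ≤ b)
    (hb : b ≤ (ds.length : Int)) :
    (((PySem.List.slice ds (some a) (some b)).length : Int)) = b - a := by
  rw [PySem.List.slice_of_nonneg ds h0 (by omega) (by omega) hb]
  simp only [List.length_take, List.length_drop]
  omega

-- per-index agreement of the two loop bodies
lemma vals_agree (digits : List Int) (hpos : ∀ d ∈ digits, 0 ≤ d) (i : Int)
    (h0 : 0 ≤ i) (h1 : i < (digits.length : Int)) :
    pvValsA digits (digits.length : Int) i
      = pvValsB digits (pvPre digits) (digits.length : Int) i := by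
  have hin : PySem.Raise.InRange digits.length i := by
    constructor <;> omega
  have hd : 0 ≤ PySem.List.pyGetD digits i 0 :=
    hpos _ (PySem.List.pyGetD_mem digits 0 hin)
  unfold pvValsA pvValsB
  set d := PySem.List.pyGetD digits i 0 with hdd
  set n : Int := (digits.length : Int) with hn
  have hlo0 : (0 : Int) ≤ max 0 (i - d) := le_max_left _ _
  have hloi : max 0 (i - d) ≤ i := by omega
  have hhi1 : i + 1 ≤ min n (i + 1 + d) := by omega
  have hhin : min n (i + 1 + d) ≤ n := min_le_left _ _
  have hiN : i ≤ n := by omega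
  simp only [List.sum_append, List.length_append]
  refine Prod.ext rfl (Prod.ext ?_ ?_)
  · simp only
    rw [slice_sum_take digits _ _ hlo0 hloi hiN,
        slice_sum_take digits _ _ (by omega) hhi1 hhin,
        pvPre_get digits i h0 hiN,
        pvPre_get digits _ hlo0 (le_trans hloi hiN),
        pvPre_get digits _ (by omega) hhin,
        pvPre_get digits (i + 1) (by omega) (by omega)]
  · simp only
    push_cast
    rw [slice_len digits _ _ hlo0 hloi hiN,
        slice_len digits _ _ (by omega) hhi1 hhin]
    omega

-- relation between the two loop states
def pvRel (a : Int × Option Int × Option Int) (b : Int × Option (Int × Int)) : Prop :=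
  a.1 = b.1 ∧ ((a.2.1 = none ∧ a.2.2 = none ∧ b.2 = none)
    ∨ ∃ l f, a.2.1 = some l ∧ a.2.2 = some f ∧ b.2 = some (l, f))

lemma step_rel (digits pre : List Int) (n : Int) (i : Int)
    (hv : pvValsA digits n i = pvValsB digits pre n i)
    (sa : Int × Option Int × Option Int) (sb : Int × Option (Int × Int))
    (hr : pvRel sa sb) :
    pvRel (pvStepA digits n sa i) (pvStepB digits pre n sb i) := by
  obtain ⟨h1, h2⟩ := hr
  unfold pvStepA pvStepB
  rw [← hv]
  rcases h2 with ⟨ha, hb, hc⟩ | ⟨l, f, ha, hb, hc⟩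
  · rw [ha, hc]
    simp only [pvLtInf, if_pos]
    exact ⟨rfl, Or.inr ⟨_, _, rfl, rfl, rfl⟩⟩
  · rw [ha, hb, hc]
    simp only [pvLtInf, pvEqInf]
    by_cases hlt : (pvValsA digits n i).2.1 < l
    · rw [if_pos (by simpa using hlt), if_pos hlt]
      exact ⟨rfl, Or.inr ⟨_, _, rfl, rfl, rfl⟩⟩
    · rw [if_neg (by simpa using hlt), if_neg hlt]
      by_cases heq : (pvValsA digits n i).2.1 = l
      · by_cases hf : (pvValsA digits n i).2.2 < f
        · rw [if_pos (by simp [heq, hf]), if_pos ⟨heq, hf⟩]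
          exact ⟨rfl, Or.inr ⟨l, _, rfl, rfl, by rw [heq]⟩⟩
        · rw [if_neg (by simp [heq, hf]), if_neg (by intro h; exact hf h.2)]
          exact ⟨h1, Or.inr ⟨l, f, ha, hb, hc⟩⟩
      · rw [if_neg (by simp [heq]), if_neg (by intro h; exact heq h.1)]
        exact ⟨h1, Or.inr ⟨l, f, ha, hb, hc⟩⟩

lemma fold_rel (digits pre : List Int) (n : Int) :
    ∀ (l : List Int), (∀ i ∈ l, pvValsA digits n i = pvValsB digits pre n i) →
    ∀ sa sb, pvRel sa sb →
      pvRel (l.foldl (pvStepA digits n) sa) (l.foldl (pvStepB digits pre n) sb) := by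
  intro l
  induction l with
  | nil => intro _ sa sb hr; exact hr
  | cons x xs ih =>
    intro hv sa sb hr
    simp only [List.foldl_cons]
    exact ih (fun i hi => hv i (List.mem_cons_of_mem _ hi)) _ _
      (step_rel digits pre n x (hv x (List.mem_cons_self)) sa sb hr)

-- ===== VERDICT (by name: the statement is the Claim_ definition above) =====
theorem lonelyNum_spec : Claim_equal_lonelyNum := by
  intro number _ hpre
  unfold Spec_lonelyNum lonelyNum lonelyNum_alt
  have hpos := pvDigits_nonneg number hpre
  have hv : ∀ i ∈ PySem.List.pyRange 0 ((pvDigits number).length : Int) 1,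
      pvValsA (pvDigits number) ((pvDigits number).length : Int) i
        = pvValsB (pvDigits number) (pvPre (pvDigits number)) ((pvDigits number).length : Int) i := by
    intro i hi
    rw [PySem.List.mem_pyRange_one] at hi
    exact vals_agree (pvDigits number) hpos i hi.1 hi.2
  have := fold_rel (pvDigits number) (pvPre (pvDigits number))
    ((pvDigits number).length : Int) _ hv
    (PySem.List.pyGetD (pvDigits number) 0 0, none, none)
    (PySem.List.pyGetD (pvDigits number) 0 0, none)
    ⟨rfl, Or.inl ⟨rfl, rfl, rfl⟩⟩
  exact this.1
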